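-- pv_equiv track=rewrite | github.com/JakubFlash/Advent2023 | d1_trebuchet.py | insert_earliest_digit_literal
-- ===== SOURCE A (Python) =====
-- def insert_earliest_digit_literal(cal_code: str, digit_list: [str]) -> str:
--
--     # list of (digit, position) for digits in <1, 9> (as "zero" is out of scope)
--     digit_positions = [(a, -1) for a in range(1,10)]
--     for i in range(9):
--         digit_positions[i] = (
--             i+1, # compensate for lack of "zero" keyword
--             cal_code.find(digit_list[i])
--             )
--
--     digit_positions.sort(key=lambda x: x[1])
--
--     earliest_pos = (-1,-1)
--     for i in range(9):
--         if digit_positions[i][1] >= 0: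
--             earliest_pos = digit_positions[i]
--             break
--
--     if earliest_pos == (-1,-1):
--         return cal_code
--
--     (dig, pos) = earliest_pos
--     cal_code = cal_code[:pos] + str(dig) + cal_code[pos:]
--     return cal_code
-- ===== SOURCE B (Python) =====
-- def insert_earliest_digit_literal(cal_code: str, digit_list: [str]) -> str:
--     # Position-major scan: walk positions left to right; at the first position
--     # where some of the first nine words matches, insert its digit (word order
--     # breaks ties, i.e. the smallest digit wins). No find() calls, no sort.
--     words = [digit_list[i] for i in range(9)]
--     for i in range(len(cal_code) + 1):
--         suffix = cal_code[i:]
--         for idx, word in enumerate(words):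
--             if suffix.startswith(word):
--                 return cal_code[:i] + str(idx + 1) + cal_code[i:]
--     return cal_code
-- ===== Notes on version B (the rewrite author's own statement) =====
-- stated objective: alternative
-- what changed: Replaces the nine find() calls plus a sort plus a first-nonnegative scan with a single position-major left-to-right scan that inserts at the first position where any of the first nine words matches (word order breaking ties).
import Mathlib
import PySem

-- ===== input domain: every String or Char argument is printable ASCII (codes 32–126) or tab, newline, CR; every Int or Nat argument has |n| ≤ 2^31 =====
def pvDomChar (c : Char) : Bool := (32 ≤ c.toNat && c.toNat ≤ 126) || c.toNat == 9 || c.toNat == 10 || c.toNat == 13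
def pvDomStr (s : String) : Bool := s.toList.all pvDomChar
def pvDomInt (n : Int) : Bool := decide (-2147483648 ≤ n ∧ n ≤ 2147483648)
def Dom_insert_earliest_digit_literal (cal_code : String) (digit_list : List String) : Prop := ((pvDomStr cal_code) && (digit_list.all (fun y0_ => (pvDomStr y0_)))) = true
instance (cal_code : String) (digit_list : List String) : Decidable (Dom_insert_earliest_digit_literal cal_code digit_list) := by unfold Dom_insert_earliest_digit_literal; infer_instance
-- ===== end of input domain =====

-- B replaces A's nine find() calls + sort + first-nonnegative scan by one position-major
-- left-to-right scan (objective: alternative, same result; return-value equivalence, no mutation).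

-- ===== PORT A =====

-- A's 'for i in range(9): if digit_positions[i][1] >= 0: earliest_pos = ...; break' over the
-- sorted list (which has exactly 9 elements whenever A returns): first element with snd >= 0.
def pvFirstNonneg : List (Int × Int) → Int × Int
  | [] => (-1, -1)
  | x :: t => if 0 ≤ x.2 then x else pvFirstNonneg t

def insert_earliest_digit_literal (cal_code : String) (digit_list : List String) : String :=
  -- digit_positions is initialised to (a, -1) and every entry is overwritten by the first loop;
  -- ported as the map that loop produces. digit_list[i] is pyGet? (raises for len < 9: see Pre_).
  let digit_positions := (List.range 9).map (fun (i : Nat) =>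
    ((i : Int) + 1, PySem.Str.find cal_code ((PySem.List.pyGet? digit_list (i : Int)).getD "")))
  let sortedPositions := PySem.List.sorted digit_positions (fun x => x.2)
  let earliest_pos := pvFirstNonneg sortedPositions
  if earliest_pos = (-1, -1) then cal_code
  else
    -- cal_code[:pos] + str(dig) + cal_code[pos:]; '+' of strings ported on code-point lists (exact)
    String.ofList (PySem.List.slice cal_code.toList none (some earliest_pos.2)
      ++ (PySem.Int.toStr earliest_pos.1).toList
      ++ PySem.List.slice cal_code.toList (some earliest_pos.2) none)

-- ===== PORT B =====

-- 'for idx, word in enumerate(words): if suffix.startswith(word)' — the first matching index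
def pvFirstMatch (words : List (List Char)) (s : List Char) : Option Nat :=
  List.findIdx? (fun w => PySem.Chars.startswith s w) words

-- the 'for i in range(len(cal_code) + 1)' scan; suffix = cal_code[i:] is consumed structurally;
-- cal_code[:i] / cal_code[i:] with 0 ≤ i ≤ len ported as take i / drop i (exact)
def pvScan (orig : List Char) (words : List (List Char)) (i : Nat) (suffix : List Char) : String :=
  match pvFirstMatch words suffix with
    | some idx => String.ofList (orig.take i ++ (PySem.Int.toStr ((idx : Int) + 1)).toList ++ orig.drop i)
    | none =>
      match suffix with
      | [] => String.ofList orig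
      | _ :: t => pvScan orig words (i + 1) t

def insert_earliest_digit_literal_alt (cal_code : String) (digit_list : List String) : String :=
  -- words = [digit_list[i] for i in range(9)]; digit_list[i] is pyGet? (raises for len < 9: Pre_)
  let words := (List.range 9).map (fun (i : Nat) => ((PySem.List.pyGet? digit_list (i : Int)).getD "").toList)
  pvScan cal_code.toList words 0 cal_code.toList

-- ===== PRECONDITION & SPEC =====
-- Pre_ excludes exactly the inputs where A raises IndexError (digit_list[i] with fewer than 9 words).
def Pre_insert_earliest_digit_literal (cal_code : String) (digit_list : List String) : Prop :=
  9 ≤ digit_list.length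
instance (cal_code : String) (digit_list : List String) : Decidable (Pre_insert_earliest_digit_literal cal_code digit_list) := by unfold Pre_insert_earliest_digit_literal; infer_instance

def pvWitness_insert_earliest_digit_literal : String × List String :=
  ("xtwone3four", ["one", "two", "three", "four", "five", "six", "seven", "eight", "nine"])

def Spec_insert_earliest_digit_literal (cal_code : String) (digit_list : List String) (out : String) : Prop := out = insert_earliest_digit_literal_alt cal_code digit_list
instance (cal_code : String) (digit_list : List String) (out : String) : Decidable (Spec_insert_earliest_digit_literal cal_code digit_list out) := by unfold Spec_insert_earliest_digit_literal; infer_instance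

-- ===== CLAIM (what is proved, stated in full; the proofs are below) =====
def Claim_equal_insert_earliest_digit_literal : Prop := ∀ (cal_code : String) (digit_list : List String), Dom_insert_earliest_digit_literal cal_code digit_list → Pre_insert_earliest_digit_literal cal_code digit_list → Spec_insert_earliest_digit_literal cal_code digit_list (insert_earliest_digit_literal cal_code digit_list)

-- ===== LEMMAS AND PROOFS =====

-- A's stable sort keyed on snd, applied to a list whose fst components strictly increase,
-- orders the pairs lexicographically on (snd, fst).
def pvLex (a b : Int × Int) : Prop := a.2 < b.2 ∨ (a.2 = b.2 ∧ a.1 < b.1)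

theorem pvInsertBy_pairwise (x : Int × Int) (acc : List (Int × Int))
    (hp : acc.Pairwise pvLex) (hlt : ∀ y ∈ acc, y.1 < x.1) :
    (PySem.List.insertBy (fun a b => decide (a.2 < b.2)) x acc).Pairwise pvLex := by
  induction acc with
  | nil => simp [PySem.List.insertBy]
  | cons y ys ih =>
    rw [List.pairwise_cons] at hp
    by_cases h : x.2 < y.2
    · have : PySem.List.insertBy (fun a b => decide (a.2 < b.2)) x (y :: ys) = x :: y :: ys := by
        simp [PySem.List.insertBy, h]
      rw [this, List.pairwise_cons]
      refine ⟨?_, List.pairwise_cons.2 hp⟩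
      intro z hz
      rcases List.mem_cons.1 hz with rfl | hz
      · exact Or.inl h
      · have := hp.1 z hz
        rcases this with h2 | ⟨h2, _⟩
        · exact Or.inl (lt_trans h h2)
        · exact Or.inl (h2 ▸ h)
    · have : PySem.List.insertBy (fun a b => decide (a.2 < b.2)) x (y :: ys) =
          y :: PySem.List.insertBy (fun a b => decide (a.2 < b.2)) x ys := by
        simp [PySem.List.insertBy, h]
      rw [this, List.pairwise_cons]
      refine ⟨?_, ih hp.2 (fun z hz => hlt z (List.mem_cons_of_mem _ hz))⟩
      intro z hz
      rcases (PySem.List.mem_insertBy _ _ _ _).1 hz with rfl | hz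
      · rcases lt_or_eq_of_le (not_lt.1 h) with h2 | h2
        · exact Or.inl h2
        · exact Or.inr ⟨h2, hlt y (List.mem_cons_self)⟩
      · exact hp.1 z hz

theorem pvFoldl_insert_pairwise (xs : List (Int × Int)) :
    ∀ (acc : List (Int × Int)), acc.Pairwise pvLex →
    (∀ a ∈ acc, ∀ b ∈ xs, a.1 < b.1) → xs.Pairwise (fun a b => a.1 < b.1) →
    (List.foldl (fun acc x => PySem.List.insertBy (fun a b => decide (a.2 < b.2)) x acc) acc xs).Pairwise pvLex := by
  induction xs with
  | nil => intro acc h _ _; simpa using h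
  | cons x xs ih =>
    intro acc h1 h2 h3
    rw [List.pairwise_cons] at h3
    simp only [List.foldl_cons]
    refine ih _ (pvInsertBy_pairwise x acc h1 (fun y hy => h2 y hy x List.mem_cons_self)) ?_ h3.2
    intro a ha b hb
    rcases (PySem.List.mem_insertBy _ _ _ _).1 ha with rfl | ha
    · exact h3.1 b hb
    · exact h2 a ha b (List.mem_cons_of_mem _ hb)

theorem pvSorted_pairwise_lex (xs : List (Int × Int)) (h : xs.Pairwise (fun a b => a.1 < b.1)) :
    (PySem.List.sorted xs (fun x => x.2)).Pairwise pvLex := by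
  rw [PySem.List.sorted_eq_foldl_insertBy]
  exact pvFoldl_insert_pairwise xs [] (by simp) (by simp) h

theorem pvFirstNonneg_none (s : List (Int × Int)) (h : ∀ x ∈ s, x.2 < 0) :
    pvFirstNonneg s = (-1, -1) := by
  induction s with
  | nil => rfl
  | cons y t ih =>
    have hy : ¬ (0 ≤ y.2) := not_le.2 (h y List.mem_cons_self)
    simp only [pvFirstNonneg, if_neg hy]
    exact ih (fun x hx => h x (List.mem_cons_of_mem _ hx))

theorem pvFirstNonneg_spec (s : List (Int × Int)) (hp : s.Pairwise pvLex)
    (x0 : Int × Int) (hx0 : x0 ∈ s) (h0 : 0 ≤ x0.2) :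
    pvFirstNonneg s ∈ s ∧ 0 ≤ (pvFirstNonneg s).2 ∧
    (∀ x ∈ s, 0 ≤ x.2 → (pvFirstNonneg s).2 ≤ x.2) ∧
    (∀ x ∈ s, x.2 = (pvFirstNonneg s).2 → (pvFirstNonneg s).1 ≤ x.1) := by
  induction s with
  | nil => cases hx0
  | cons y t ih =>
    rw [List.pairwise_cons] at hp
    by_cases hy : 0 ≤ y.2
    · simp only [pvFirstNonneg, if_pos hy]
      refine ⟨List.mem_cons_self, hy, ?_, ?_⟩
      · intro x hx _
        rcases List.mem_cons.1 hx with rfl | hx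
        · exact le_refl _
        · rcases hp.1 x hx with h2 | ⟨h2, _⟩
          · exact le_of_lt h2
          · exact le_of_eq h2
      · intro x hx hx2
        rcases List.mem_cons.1 hx with rfl | hx
        · exact le_refl _
        · rcases hp.1 x hx with h2 | ⟨_, h2⟩
          · omega
          · exact le_of_lt h2
    · simp only [pvFirstNonneg, if_neg hy]
      have hx0t : x0 ∈ t := by
        rcases List.mem_cons.1 hx0 with rfl | h
        · exact absurd h0 hy
        · exact h
      obtain ⟨m1, m2, m3, m4⟩ := ih hp.2 hx0t
      refine ⟨List.mem_cons_of_mem _ m1, m2, ?_, ?_⟩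
      · intro x hx hxn
        rcases List.mem_cons.1 hx with rfl | hx
        · exact absurd hxn hy
        · exact m3 x hx hxn
      · intro x hx hxe
        rcases List.mem_cons.1 hx with rfl | hx
        · omega
        · exact m4 x hx hxe

-- B's scan returns the string unchanged when no word occurs anywhere in the suffix.
theorem pvScan_no_match (orig : List Char) (words : List (List Char)) :
    ∀ (suffix : List Char) (i : Nat), (∀ w ∈ words, ¬ w <:+: suffix) →
    pvScan orig words i suffix = String.ofList orig := by
  intro suffix
  induction suffix with
  | nil =>
    intro i h
    have : pvFirstMatch words [] = none := by
      rw [pvFirstMatch, List.findIdx?_eq_none_iff]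
      intro w hw
      rw [Bool.eq_false_iff]
      intro hc
      exact h w hw ((PySem.Chars.startswith_iff _ _).1 hc).isInfix
    rw [pvScan.eq_def, this]
  | cons c t ih =>
    intro i h
    have hnone : pvFirstMatch words (c :: t) = none := by
      rw [pvFirstMatch, List.findIdx?_eq_none_iff]
      intro w hw
      rw [Bool.eq_false_iff]
      intro hc
      exact h w hw ((PySem.Chars.startswith_iff _ _).1 hc).isInfix
    rw [pvScan.eq_def, hnone]
    exact ih (i + 1) (fun w hw hinf => h w hw (hinf.trans (List.suffix_cons c t).isInfix))

-- B's scan, when the first matching position is p (word index jr there), inserts at p.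
theorem pvScan_reach (orig : List Char) (words : List (List Char)) (p jr : Nat)
    (hpl : p ≤ orig.length)
    (H1 : ∀ k, k < p → pvFirstMatch words (orig.drop k) = none)
    (H2 : pvFirstMatch words (orig.drop p) = some jr) :
    ∀ (n i : Nat), i ≤ p → p - i = n →
    pvScan orig words i (orig.drop i) =
      String.ofList (orig.take p ++ (PySem.Int.toStr ((jr : Int) + 1)).toList ++ orig.drop p) := by
  intro n
  induction n with
  | zero =>
    intro i hi hn
    have : i = p := by omega
    subst this
    rw [pvScan.eq_def, H2]
  | succ n ih =>
    intro i hi hn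
    have hip : i < p := by omega
    have hlen : i < orig.length := lt_of_lt_of_le hip hpl
    rw [pvScan.eq_def, H1 i hip]
    rw [List.drop_eq_getElem_cons hlen]
    exact ih (i + 1) (by omega) (by omega)

-- ===== VERDICT (by name: the statement is the Claim_ definition above) =====
theorem insert_earliest_digit_literal_spec : Claim_equal_insert_earliest_digit_literal := by
  intro cal_code digit_list _ hpre
  unfold Pre_insert_earliest_digit_literal at hpre
  unfold Spec_insert_earliest_digit_literal
  unfold insert_earliest_digit_literal insert_earliest_digit_literal_alt
  set l := cal_code.toList with hl
  set F : Nat → Int := fun j => PySem.Chars.find l (digit_list.getD j "").toList with hF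
  set words : List (List Char) :=
    (List.range 9).map (fun (i : Nat) => ((PySem.List.pyGet? digit_list (i : Int)).getD "").toList) with hwords
  have hwlen : words.length = 9 := by rw [hwords]; simp
  have hwget : ∀ (j : Nat) (hj : j < 9), words[j]'(by omega) = (digit_list.getD j "").toList := by
    intro j hj
    simp [hwords, PySem.List.pyGet?_natCast, List.getD_eq_getElem?_getD]
  -- the pairs list A builds
  have hpairs : ((List.range 9).map (fun (i : Nat) =>
      ((i : Int) + 1, PySem.Str.find cal_code ((PySem.List.pyGet? digit_list (i : Int)).getD "")))) =
      (List.range 9).map (fun (i : Nat) => ((i : Int) + 1, F i)) := by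
    apply List.map_congr_left
    intro i hi
    have hil : i < digit_list.length := by
      have := List.mem_range.1 hi; omega
    simp only [PySem.List.pyGet?_natCast, PySem.Str.find_eq, hF, hl,
      List.getD_eq_getElem?_getD]
  rw [hpairs]
  set pairs := (List.range 9).map (fun (i : Nat) => ((i : Int) + 1, F i)) with hpairsdef
  have hmem : ∀ x ∈ pairs, ∃ j : Nat, j < 9 ∧ x = ((j : Int) + 1, F j) := by
    intro x hx
    obtain ⟨j, hj, rfl⟩ := List.mem_map.1 hx
    exact ⟨j, List.mem_range.1 hj, rfl⟩
  have hmem' : ∀ j : Nat, j < 9 → ((j : Int) + 1, F j) ∈ pairs := by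
    intro j hj
    exact List.mem_map.2 ⟨j, List.mem_range.2 hj, rfl⟩
  have hfstinc : pairs.Pairwise (fun a b => a.1 < b.1) := by
    rw [hpairsdef, List.pairwise_map]
    exact List.Pairwise.imp (by intro a b h; simp; omega) List.pairwise_lt_range
  set sortedP := PySem.List.sorted pairs (fun x => x.2) with hsorted
  have hplex : sortedP.Pairwise pvLex := pvSorted_pairwise_lex pairs hfstinc
  -- a word being a prefix of l.drop k forces its find to be nonnegative and at most k
  have hmatch : ∀ (j k : Nat), j < 9 →
      ((digit_list.getD j "").toList <+: l.drop k → (0 ≤ F j ∧ (F j).toNat ≤ k)) := by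
    intro j k hj hpre'
    have hinf : (digit_list.getD j "").toList <:+: l :=
      hpre'.isInfix.trans (List.drop_suffix k l).isInfix
    have hnn : (0 : Int) ≤ F j := (PySem.Chars.find_nonneg_iff l (digit_list.getD j "").toList).2 hinf
    refine ⟨hnn, ?_⟩
    by_contra hc
    push_neg at hc
    exact absurd hpre' ((PySem.Chars.find_spec hnn).2 k hc)
  by_cases hex : ∃ j : Nat, j < 9 ∧ 0 ≤ F j
  · -- some word occurs: A inserts at the minimum find position, smallest digit on ties
    obtain ⟨j0, hj0, hF0⟩ := hex
    have hx0 : ((j0 : Int) + 1, F j0) ∈ sortedP :=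
      (PySem.List.mem_sorted _ _ _ _).2 (hmem' j0 hj0)
    obtain ⟨m1, m2, m3, m4⟩ := pvFirstNonneg_spec sortedP hplex _ hx0 hF0
    set r := pvFirstNonneg sortedP with hr
    obtain ⟨jr, hjr, hreq⟩ := hmem r ((PySem.List.mem_sorted _ _ _ _).1 m1)
    have hr2 : r.2 = F jr := by rw [hreq]
    have hr1 : r.1 = (jr : Int) + 1 := by rw [hreq]
    have hrne : ¬ (r = (-1, -1)) := by
      intro h; rw [h] at m2; norm_num at m2
    rw [if_neg hrne]
    set p := (F jr).toNat with hpdef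
    have hFjr : (0 : Int) ≤ F jr := hr2 ▸ m2
    have hpl : p ≤ l.length := by
      have hle : F jr ≤ (l.length : Int) :=
        PySem.Chars.find_le_length l (digit_list.getD jr "").toList
      omega
    -- minimality of p over all matching words, transported through the sorted list
    have hminp : ∀ j : Nat, j < 9 → 0 ≤ F j → (p : Int) ≤ F j := by
      intro j hj hnn
      have := m3 _ ((PySem.List.mem_sorted _ _ _ _).2 (hmem' j hj)) hnn
      rw [hr2] at this
      omega
    -- H1: no word matches strictly before p
    have H1 : ∀ k, k < p → pvFirstMatch words (l.drop k) = none := by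
      intro k hk
      rw [pvFirstMatch, List.findIdx?_eq_none_iff]
      intro w hw
      rw [Bool.eq_false_iff]
      intro hc
      obtain ⟨j, hjlt, hjeq⟩ := List.mem_iff_getElem.1 hw
      have hj9 : j < 9 := by omega
      rw [hwget j hj9] at hjeq
      rw [← hjeq] at hc
      obtain ⟨hnn, hle⟩ := hmatch j k hj9 ((PySem.Chars.startswith_iff _ _).1 hc)
      have := hminp j hj9 hnn
      omega
    -- H2: at p the first matching word is jr
    have H2 : pvFirstMatch words (l.drop p) = some jr := by
      rw [pvFirstMatch, List.findIdx?_eq_some_iff_getElem]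
      refine ⟨by omega, ?_, ?_⟩
      · rw [hwget jr hjr, PySem.Chars.startswith_iff]
        exact (PySem.Chars.find_spec hFjr).1
      · intro k hk hc
        have hk9 : k < 9 := by omega
        rw [hwget k hk9, PySem.Chars.startswith_iff] at hc
        obtain ⟨hnn, hle⟩ := hmatch k p hk9 hc
        have hge := hminp k hk9 hnn
        have hFk : F k = r.2 := by rw [hr2]; omega
        have := m4 _ ((PySem.List.mem_sorted _ _ _ _).2 (hmem' k hk9)) hFk
        rw [hr1] at this
        omega
    have hscan := pvScan_reach l words p jr hpl H1 H2 (p - 0) 0 (by omega) rfl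
    rw [List.drop_zero] at hscan
    rw [hscan]
    rw [PySem.List.slice_to l m2, PySem.List.slice_from l m2, hr1, hr2]
  · -- no word occurs anywhere: both sides return the input unchanged
    push_neg at hex
    have hall : ∀ x ∈ sortedP, x.2 < 0 := by
      intro x hx
      obtain ⟨j, hj, rfl⟩ := hmem x ((PySem.List.mem_sorted _ _ _ _).1 hx)
      exact hex j hj
    rw [if_pos (pvFirstNonneg_none sortedP hall)]
    rw [pvScan_no_match l words l]
    · simp [hl]
    · intro w hw hinf
      obtain ⟨j, hjlt, hjeq⟩ := List.mem_iff_getElem.1 hw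
      have hj9 : j < 9 := by omega
      rw [hwget j hj9] at hjeq
      rw [← hjeq] at hinf
      have h1 : (0 : Int) ≤ F j :=
        (PySem.Chars.find_nonneg_iff l (digit_list.getD j "").toList).2 hinf
      exact absurd h1 (not_le.2 (hex j hj9))
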